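-- pv_equiv track=rewrite | github.com/HitaloCesar/mc102 | lab16/lab16.py | linksResposta
-- ===== SOURCE A (Python) =====
-- def linksResposta(links,resp):
--     numLinks = []
--     for i in range(len(resp) ):
--         if resp[i] == 0:
--             numLinks.append(-1)
--         else:
--             cont = 0
--             for j in range(len(links) ):
--                 if links[j][i] == 1 and resp[j] == 1:
--                     cont+=1
--             numLinks.append(cont)
--
--
--     return numLinks
-- ===== SOURCE B (Python) =====
-- def linksResposta(links, resp):
--     # Row-major scatter: initialise the answer, early-return when no node is
--     # active, then walk only the active rows once, accumulating per-column
--     # counts in a dict.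
--     if not any(resp):
--         return [-1] * len(resp)
--     active = [i for i, r in enumerate(resp) if r != 0]
--     cnt = {}
--     for row, r in zip(links, resp):
--         if r == 1:
--             for i in active:
--                 if row[i] == 1:
--                     cnt[i] = cnt.get(i, 0) + 1
--     return [cnt.get(i, 0) if resp[i] else -1 for i in range(len(resp))]
-- ===== Notes on version B (the rewrite author's own statement) =====
-- stated objective: alternative
-- what changed: Per-column gather that rescans all rows for every active node is replaced by an early return when no node is active plus a single row-major scatter pass over the active rows (zip of links and resp) accumulating per-column counts in a dict.
import Mathlib
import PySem

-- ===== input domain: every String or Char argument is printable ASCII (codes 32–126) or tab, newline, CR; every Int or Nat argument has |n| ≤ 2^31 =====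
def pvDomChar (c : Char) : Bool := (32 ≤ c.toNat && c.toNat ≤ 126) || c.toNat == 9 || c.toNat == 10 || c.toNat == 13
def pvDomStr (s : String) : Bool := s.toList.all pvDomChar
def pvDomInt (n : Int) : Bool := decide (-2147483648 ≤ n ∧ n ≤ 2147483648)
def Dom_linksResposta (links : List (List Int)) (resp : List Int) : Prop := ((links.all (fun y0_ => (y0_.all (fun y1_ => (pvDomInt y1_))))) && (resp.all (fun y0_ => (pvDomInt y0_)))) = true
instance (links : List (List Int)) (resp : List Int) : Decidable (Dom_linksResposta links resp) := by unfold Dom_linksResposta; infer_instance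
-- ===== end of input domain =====

-- B replaces A's per-column gather (rescanning every row for each active node) by an early
-- return when no node is active plus one row-major scatter pass over the active rows that
-- accumulates per-column counts in a dict; objective: alternative decomposition, same result.

-- ===== PORT A =====
def linksResposta (links : List (List Int)) (resp : List Int) : List Int :=
  (PySem.List.pyRange 0 resp.length 1).foldl
    (fun numLinks i =>
      if PySem.List.pyGetD resp i 0 == 0 then numLinks ++ [(-1 : Int)]
      else
        numLinks ++
          [(PySem.List.pyRange 0 links.length 1).foldl
            (fun cont j =>
              if PySem.List.pyGetD (PySem.List.pyGetD links j []) i 0 == 1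
                  && PySem.List.pyGetD resp j 0 == 1 then cont + 1
              else cont) 0]) []

-- ===== PORT B =====
def linksResposta_alt (links : List (List Int)) (resp : List Int) : List Int :=
  if resp.all (fun r => r == 0) then resp.map (fun _ => (-1 : Int))
  else
    let active : List Int :=
      (PySem.List.enumerate resp 0).filterMap (fun p => if p.2 ≠ 0 then some p.1 else none)
    let cnt : PySem.Dict Int Int :=
      (links.zip resp).foldl
        (fun d p =>
          if p.2 == 1 then
            active.foldl
              (fun d i =>
                if PySem.List.pyGetD p.1 i 0 == 1 then d.insert i (d.getD i 0 + 1) else d) d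
          else d)
        PySem.Dict.empty
    (PySem.List.pyRange 0 resp.length 1).map
      (fun i => if PySem.List.pyGetD resp i 0 ≠ 0 then cnt.getD i 0 else -1)

-- ===== PRECONDITION & SPEC =====
-- Pre_ holds exactly where the Python A returns (no IndexError): for every active column i
-- and every row j, links[j][i] is in range, and whenever links[j][i] == 1 the short-circuited
-- read of resp[j] is in range too.
def Pre_linksResposta (links : List (List Int)) (resp : List Int) : Prop :=
  ∀ i < resp.length, resp.getD i 0 ≠ 0 →
    ∀ j < links.length, i < (links.getD j []).length ∧
      ((links.getD j []).getD i 0 = 1 → j < resp.length)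
instance (links : List (List Int)) (resp : List Int) : Decidable (Pre_linksResposta links resp) := by
  unfold Pre_linksResposta; infer_instance
def pvWitness_linksResposta : List (List Int) × List Int := ([[1, 1], [0, 1]], [1, 1])

def Spec_linksResposta (links : List (List Int)) (resp : List Int) (out : List Int) : Prop := out = linksResposta_alt links resp
instance (links : List (List Int)) (resp : List Int) (out : List Int) : Decidable (Spec_linksResposta links resp out) := by unfold Spec_linksResposta; infer_instance

-- ===== CLAIM (what is proved, stated in full; the proofs are below) =====
def Claim_equal_linksResposta : Prop := ∀ (links : List (List Int)) (resp : List Int), Dom_linksResposta links resp → Pre_linksResposta links resp → Spec_linksResposta links resp (linksResposta links resp)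

-- ===== LEMMAS AND PROOFS =====

-- A's inner gather loop for column i, as a countP over the zip of rows with responses
-- (rows beyond len(resp) contribute nothing since resp reads default to 0 there).
theorem cntA_eq_countP (links : List (List Int)) (resp : List Int) (i : Int) :
    (PySem.List.pyRange 0 links.length 1).foldl
      (fun cont j =>
        if PySem.List.pyGetD (PySem.List.pyGetD links j []) i 0 == 1
            && PySem.List.pyGetD resp j 0 == 1 then cont + 1
        else cont) 0
    = ((links.zip resp).countP
        (fun p => PySem.List.pyGetD p.1 i 0 == 1 && p.2 == 1) : Int) := by
  have hM : (((links.zip resp).length : Int)) = min (links.length : Int) (resp.length : Int) := by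
    rw [List.length_zip]; push_cast [Nat.cast_min]; rfl
  have hsplit : PySem.List.pyRange 0 (links.length : Int) 1
      = PySem.List.pyRange 0 ((links.zip resp).length : Int) 1
        ++ PySem.List.pyRange ((links.zip resp).length : Int) (links.length : Int) 1 := by
    refine PySem.List.pyRange_one_append 0 _ _ (by positivity) ?_
    rw [hM]; exact min_le_left _ _
  rw [hsplit, List.foldl_append, PySem.List.foldl_count_if, PySem.List.foldl_count_if]
  have htail : ((PySem.List.pyRange ((links.zip resp).length : Int) (links.length : Int) 1).countP
      (fun j => PySem.List.pyGetD (PySem.List.pyGetD links j []) i 0 == 1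
          && PySem.List.pyGetD resp j 0 == 1)) = 0 := by
    refine List.countP_eq_zero.mpr (fun j hj => ?_)
    obtain ⟨h1, h2⟩ := PySem.List.mem_pyRange_one.mp hj
    have hj0 : (0 : Int) ≤ j := le_trans (by positivity) h1
    have hjR : (resp.length : Int) ≤ j := by
      rw [hM] at h1; omega
    have : PySem.List.pyGetD resp j 0 = 0 := by
      rw [PySem.List.pyGetD_of_nonneg _ _ hj0]
      exact List.getD_eq_default _ _ (by omega)
    simp [this]
  rw [htail]
  rw [show ((0:Nat):Int) = 0 from rfl, add_zero, zero_add]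
  congr 1
  have hzip := PySem.List.map_pyGetD_pyRange_zero (links.zip resp) (([], 0) : List Int × Int)
  rw [PySem.List.len_eq] at hzip
  conv_rhs => rw [← hzip]
  rw [List.countP_map]
  refine List.countP_congr (fun j hj => ?_)
  obtain ⟨h1, h2⟩ := PySem.List.mem_pyRange_one.mp hj
  have hjL : j < (links.length : Int) := by rw [hM] at h2; omega
  have hjR : j < (resp.length : Int) := by rw [hM] at h2; omega
  have hz : PySem.List.pyGetD (links.zip resp) j ([], 0) = (links.zip resp)[j.toNat]'(by omega) := by
    exact PySem.List.pyGetD_eq_getElem _ _ h1 h2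
  have hgz : (links.zip resp)[j.toNat]'(by omega) = (links[j.toNat]'(by omega), resp[j.toNat]'(by omega)) :=
    List.getElem_zip
  have hl : PySem.List.pyGetD links j [] = links[j.toNat]'(by omega) :=
    PySem.List.pyGetD_eq_getElem _ _ h1 hjL
  have hr : PySem.List.pyGetD resp j 0 = resp[j.toNat]'(by omega) :=
    PySem.List.pyGetD_eq_getElem _ _ h1 hjR
  simp only [Function.comp, hz, hgz, hl, hr]

-- B's inner scatter loop bumps the dict at i once per occurrence of i in act (when row[i] == 1).
theorem inner_getD (row : List Int) (act : List Int) (d : PySem.Dict Int Int) (i : Int) :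
    (act.foldl
        (fun d i' =>
          if PySem.List.pyGetD row i' 0 == 1 then d.insert i' (d.getD i' 0 + 1) else d) d).getD i 0
    = d.getD i 0 + (if PySem.List.pyGetD row i 0 == 1 then (act.count i : Int) else 0) := by
  induction act generalizing d with
  | nil => simp
  | cons a act ih =>
    rw [List.foldl_cons, ih, List.count_cons]
    by_cases hai : a = i
    · subst hai
      by_cases hrow : (PySem.List.pyGetD row a 0 == 1) = true
      · rw [if_pos hrow, if_pos hrow, if_pos hrow, PySem.Dict.getD_insert_self]
        simp only [BEq.rfl, if_pos]
        push_cast; ring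
      · rw [if_neg hrow, if_neg hrow, if_neg hrow]
    · have hne : (a == i) = false := by simp [hai]
      rw [hne]
      by_cases hrowa : (PySem.List.pyGetD row a 0 == 1) = true
      · rw [if_pos hrowa, PySem.Dict.getD_insert, if_neg (fun h => hai h.symm)]
        simp
      · rw [if_neg hrowa]
        simp

-- B's scatter pass over the rows, read back at key i.
theorem scatter_getD (pairs : List (List Int × Int)) (act : List Int)
    (d : PySem.Dict Int Int) (i : Int) :
    (pairs.foldl
        (fun d p =>
          if p.2 == 1 then
            act.foldl
              (fun d i' =>
                if PySem.List.pyGetD p.1 i' 0 == 1 then d.insert i' (d.getD i' 0 + 1) else d) d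
          else d) d).getD i 0
    = d.getD i 0 + (act.count i : Int) *
        (pairs.countP (fun p => p.2 == 1 && PySem.List.pyGetD p.1 i 0 == 1) : Int) := by
  induction pairs generalizing d with
  | nil => simp
  | cons p pairs ih =>
    rw [List.foldl_cons, ih, List.countP_cons]
    by_cases h2 : (p.2 == 1) = true
    · rw [if_pos h2, inner_getD]
      by_cases hrow : (PySem.List.pyGetD p.1 i 0 == 1) = true
      · rw [if_pos hrow]
        simp only [h2, hrow, Bool.true_and, if_pos]
        push_cast; ring
      · rw [if_neg hrow]
        simp only [h2, hrow, Bool.true_and, Bool.false_eq_true, if_false]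
        push_cast; ring
    · rw [if_neg h2]
      simp only [h2, Bool.false_and, Bool.false_eq_true, if_false]
      push_cast; ring

-- B's active list counts each in-range nonzero index exactly once.
theorem active_count (resp : List Int) (s i : Int) :
    ((PySem.List.enumerate resp s).filterMap
        (fun p => if p.2 ≠ 0 then some p.1 else none)).count i
    = if s ≤ i ∧ i < s + resp.length ∧ resp.getD (i - s).toNat 0 ≠ 0 then 1 else 0 := by
  induction resp generalizing s with
  | nil =>
    rw [PySem.List.enumerate_nil, List.filterMap_nil, List.count_nil,
      if_neg (fun h => by have h1 := h.1; have h2 := h.2.1; simp at h2; omega)]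
  | cons r resp ih =>
    rw [PySem.List.enumerate_cons]
    by_cases hr : r ≠ 0
    · rw [List.filterMap_cons_some (b := s) (by simp [hr]), List.count_cons, ih]
      by_cases hsi : s = i
      · subst hsi
        have hc : s ≤ s ∧ s < s + (((r :: resp).length : Nat) : Int) ∧
            (r :: resp).getD ((s - s).toNat) 0 ≠ 0 :=
          ⟨le_refl s, by push_cast [List.length_cons]; omega, by simpa using hr⟩
        rw [if_neg (fun h => by have := h.1; omega), if_pos hc]
        simp
      · have hne : (s == i) = false := by simp [hsi]
        rw [hne]
        simp only [Bool.false_eq_true, if_false, add_zero]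
        by_cases hgt : s + 1 ≤ i
        · have hsh : (i - s).toNat = (i - (s + 1)).toNat + 1 := by omega
          rw [hsh, List.getD_cons_succ]
          refine if_congr ⟨fun h => ⟨by omega, ?_, h.2.2⟩, fun h => ⟨by omega, ?_, h.2.2⟩⟩ rfl rfl
          · have := h.2.1; push_cast [List.length_cons] at this ⊢; omega
          · have := h.2.1; push_cast [List.length_cons] at this ⊢; omega
        · rw [if_neg (fun h => hgt (by have := h.1; omega)),
            if_neg (fun h => hgt (by have := h.1; omega))]
    · rw [List.filterMap_cons_none (by simp at hr; simp [hr]), ih]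
      by_cases hgt : s + 1 ≤ i
      · have hsh : (i - s).toNat = (i - (s + 1)).toNat + 1 := by omega
        rw [hsh, List.getD_cons_succ]
        refine if_congr ⟨fun h => ⟨by omega, ?_, h.2.2⟩, fun h => ⟨by omega, ?_, h.2.2⟩⟩ rfl rfl
        · have := h.2.1; push_cast [List.length_cons] at this ⊢; omega
        · have := h.2.1; push_cast [List.length_cons] at this ⊢; omega
      · rw [if_neg (fun h => hgt (by have := h.1; omega)), if_neg]
        rintro ⟨h1, h2, h3⟩
        have hieq : i = s := by omega
        apply h3
        rw [hieq, sub_self]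
        simp at hr
        simpa using hr

-- The two ports agree on every input (Pre_ only matters for the Python side, where A raises).
theorem ports_agree (links : List (List Int)) (resp : List Int) :
    linksResposta links resp = linksResposta_alt links resp := by
  unfold linksResposta linksResposta_alt
  rw [show (fun (numLinks : List Int) (i : Int) =>
        if PySem.List.pyGetD resp i 0 == 0 then numLinks ++ [(-1 : Int)]
        else numLinks ++
          [(PySem.List.pyRange 0 links.length 1).foldl
            (fun cont j =>
              if PySem.List.pyGetD (PySem.List.pyGetD links j []) i 0 == 1
                  && PySem.List.pyGetD resp j 0 == 1 then cont + 1
              else cont) 0])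
      = (fun (numLinks : List Int) (i : Int) => numLinks ++
          [if PySem.List.pyGetD resp i 0 == 0 then (-1 : Int)
           else (PySem.List.pyRange 0 links.length 1).foldl
            (fun cont j =>
              if PySem.List.pyGetD (PySem.List.pyGetD links j []) i 0 == 1
                  && PySem.List.pyGetD resp j 0 == 1 then cont + 1
              else cont) 0]) from by funext n i; split <;> rfl,
    PySem.List.foldl_append_singleton_eq_map, List.nil_append]
  by_cases hall : resp.all (fun r => r == 0)
  · rw [if_pos hall]
    rw [List.map_congr_left (g := fun _ => (-1 : Int)) (fun i hi => by
      obtain ⟨h0, hR⟩ := PySem.List.mem_pyRange_one.mp hi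
      have : PySem.List.pyGetD resp i 0 = 0 := by
        rw [PySem.List.pyGetD_eq_getElem _ _ h0 hR]
        have := List.all_eq_true.mp hall _ (List.getElem_mem (n := i.toNat) (by omega))
        simpa using this
      simp [this])]
    rw [List.map_const', List.map_const', PySem.List.length_pyRange_one]
    norm_num
  · rw [if_neg hall]
    refine List.map_congr_left (fun i hi => ?_)
    obtain ⟨h0, hR⟩ := PySem.List.mem_pyRange_one.mp hi
    by_cases hz : (PySem.List.pyGetD resp i 0 == 0) = true
    · rw [if_pos hz, if_neg (by simpa using hz)]
    · rw [if_neg hz, if_pos (by simpa using hz)]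
      rw [cntA_eq_countP, scatter_getD, active_count, PySem.Dict.getD_empty]
      rw [if_pos ⟨h0, by simpa using hR, by
        have : PySem.List.pyGetD resp i 0 ≠ 0 := by simpa using hz
        rw [PySem.List.pyGetD_of_nonneg _ _ h0] at this
        simpa using this⟩]
      have hswap : (links.zip resp).countP (fun p => PySem.List.pyGetD p.1 i 0 == 1 && p.2 == 1)
          = (links.zip resp).countP (fun p => p.2 == 1 && PySem.List.pyGetD p.1 i 0 == 1) :=
        List.countP_congr (fun p _ => by rw [Bool.and_comm])
      rw [hswap]
      push_cast
      ring

-- ===== VERDICT (by name: the statement is the Claim_ definition above) =====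
theorem linksResposta_spec : Claim_equal_linksResposta :=
  fun links resp _ _ => ports_agree links resp
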